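-- pv_equiv track=rewrite | github.com/storborg/pyweaving | src/pyweaving/generators/satin.py | find_regular_satin_counts
-- ===== SOURCE A (Python) =====
-- def factorize(num):
--     return [n for n in range(1, num + 1) if num % n == 0]
--
-- def find_regular_satin_counts(unit_size):
--     """ satin count !=1, !=size of unit, != size-1
--         also remove values that share factors with unit (e.g.for 8 remove 2,4,6
--     """
--     possibles = [i for i in range(2, unit_size-1)]
--     # find unit factors
--     unit_factors = factorize(unit_size)[1:-1]
--     # trim obvious possibles
--     possibles = [i for i in possibles if i not in unit_factors]
--     # find possibles with common factors
--     nope = []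
--     for p in possibles:
--         facts = factorize(p)[1:-1]
--         for f in facts:
--             if f in unit_factors:
--                 nope.append(p)
--     result = [p for p in possibles if p not in nope]
--     return result
-- ===== SOURCE B (Python) =====
-- def _gcd(a, b):
--     while b:
--         a, b = b, a % b
--     return a
--
-- def find_regular_satin_counts(unit_size):
--     """ satin count !=1, !=size of unit, != size-1
--         also remove values that share factors with unit (e.g.for 8 remove 2,4,6
--     """
--     return [i for i in range(2, unit_size - 1) if _gcd(i, unit_size) == 1]
-- ===== Notes on version B (the rewrite author's own statement) =====
-- stated objective: faster
-- what changed: Replaces the three staged passes with per-candidate divisor-list construction (factorize builds full divisor lists via trial division over 1..p, then list-membership scans) by a single pass over the range keeping i exactly when Euclid's gcd(i, unit_size) == 1.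
import Mathlib
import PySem

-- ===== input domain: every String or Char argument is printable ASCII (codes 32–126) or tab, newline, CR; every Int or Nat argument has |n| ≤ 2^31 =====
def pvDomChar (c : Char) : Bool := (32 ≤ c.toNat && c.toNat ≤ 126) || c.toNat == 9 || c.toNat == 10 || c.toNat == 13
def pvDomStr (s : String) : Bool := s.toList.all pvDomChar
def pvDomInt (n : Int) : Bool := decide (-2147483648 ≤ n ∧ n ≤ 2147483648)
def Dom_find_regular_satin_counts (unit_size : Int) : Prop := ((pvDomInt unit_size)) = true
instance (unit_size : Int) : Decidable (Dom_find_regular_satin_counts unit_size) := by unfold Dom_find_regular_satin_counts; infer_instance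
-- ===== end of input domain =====

-- B replaces A's staged divisor-list passes by one gcd filter over the range (measured faster; return value only).


-- ===== PORT A =====
def factorize (num : Int) : List Int :=
  (PySem.List.pyRange 1 (num + 1) 1).filter (fun n => PySem.Int.mod num n == 0)

def find_regular_satin_counts (unit_size : Int) : List Int :=
  let possibles := PySem.List.pyRange 2 (unit_size - 1) 1
  let unit_factors := PySem.List.slice (factorize unit_size) (some 1) (some (-1))
  let possibles := possibles.filter (fun i => !(unit_factors.contains i))
  let nope := possibles.foldl (fun acc p =>
      (PySem.List.slice (factorize p) (some 1) (some (-1))).foldl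
        (fun acc2 f => if unit_factors.contains f then acc2 ++ [p] else acc2) acc) []
  possibles.filter (fun p => !(nope.contains p))

-- ===== PORT B =====
-- termination helper for the Euclid loop (cited in decreasing_by)
theorem pyMod_natAbs_lt (a b : Int) (hb : b ≠ 0) :
    (PySem.Int.mod a b).natAbs < b.natAbs := by
  rcases lt_or_gt_of_ne hb with h | h
  · have := PySem.Int.mod_neg_bounds a h
    omega
  · have h1 := PySem.Int.mod_nonneg a h
    have h2 := PySem.Int.mod_lt a h
    omega

def pyGcd (a b : Int) : Int :=
  if _hb : b = 0 then a else pyGcd b (PySem.Int.mod a b)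
termination_by b.natAbs
decreasing_by exact pyMod_natAbs_lt a b _hb

def find_regular_satin_counts_alt (unit_size : Int) : List Int :=
  (PySem.List.pyRange 2 (unit_size - 1) 1).filter (fun i => pyGcd i unit_size == 1)

-- ===== PRECONDITION & SPEC =====
def Spec_find_regular_satin_counts (unit_size : Int) (out : List Int) : Prop := out = find_regular_satin_counts_alt unit_size
instance (unit_size : Int) (out : List Int) : Decidable (Spec_find_regular_satin_counts unit_size out) := by unfold Spec_find_regular_satin_counts; infer_instance

-- ===== CLAIM (what is proved, stated in full; the proofs are below) =====
def Claim_equal_find_regular_satin_counts : Prop := ∀ (unit_size : Int), Dom_find_regular_satin_counts unit_size → Spec_find_regular_satin_counts unit_size (find_regular_satin_counts unit_size)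

-- ===== LEMMAS AND PROOFS =====

-- the middle of the ascending divisor list: divisors in [2, num-1]
def midFactors (num : Int) : List Int :=
  (PySem.List.pyRange 2 num 1).filter (fun n => PySem.Int.mod num n == 0)

theorem factorize_shape {num : Int} (h : 2 ≤ num) :
    factorize num = 1 :: midFactors num ++ [num] := by
  unfold factorize midFactors
  rw [PySem.List.pyRange_one_append 1 2 (num+1) (by omega) (by omega),
      PySem.List.pyRange_one_append 2 num (num+1) (by omega) (by omega),
      PySem.List.pyRange_one_singleton,
      show PySem.List.pyRange 1 2 1 = [1] from PySem.List.pyRange_one_singleton 1]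
  have hm : PySem.Int.mod num num = 0 := (PySem.Int.mod_eq_zero_iff_dvd num num).mpr dvd_rfl
  simp [List.filter_append, List.filter, hm]

theorem slice_mid (a b : Int) (m : List Int) :
    PySem.List.slice (a :: m ++ [b]) (some 1) (some (-1)) = m := by
  simp [PySem.List.slice]

theorem mem_UF {num x : Int} (h : 2 ≤ num) :
    x ∈ PySem.List.slice (factorize num) (some 1) (some (-1)) ↔ 2 ≤ x ∧ x < num ∧ x ∣ num := by
  rw [factorize_shape h, slice_mid]
  simp [midFactors, List.mem_filter, PySem.List.mem_pyRange_one,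
    PySem.Int.mod_eq_zero_iff_dvd, and_assoc]

theorem pyGcd_eq_gcd_aux (k : Nat) : ∀ a b : Int, b.natAbs ≤ k → 0 ≤ a → 0 ≤ b →
    pyGcd a b = (Int.gcd a b : Int) := by
  induction k with
  | zero =>
    intro a b hk ha _
    have hb0 : b = 0 := by omega
    subst hb0
    rw [pyGcd]
    simp [Int.gcd, Int.natAbs_of_nonneg ha]
  | succ k ih =>
    intro a b hk ha hb
    by_cases h : b = 0
    · subst h; rw [pyGcd]; simp [Int.gcd, Int.natAbs_of_nonneg ha]
    · have hbpos : 0 < b := lt_of_le_of_ne hb (Ne.symm h)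
      rw [pyGcd, dif_neg h, PySem.Int.mod_eq_emod_of_pos hbpos]
      have hlt := pyMod_natAbs_lt a b h
      rw [PySem.Int.mod_eq_emod_of_pos hbpos] at hlt
      rw [ih b (a % b) (by omega) hb (Int.emod_nonneg a h)]
      rw [Int.gcd_comm b (a % b), Int.gcd_emod]

theorem pyGcd_eq_gcd {a b : Int} (ha : 0 ≤ a) (hb : 0 ≤ b) :
    pyGcd a b = (Int.gcd a b : Int) :=
  pyGcd_eq_gcd_aux b.natAbs a b le_rfl ha hb

-- the pointwise fact: for 2 ≤ i ≤ n-2, A's keep-condition is gcd(i,n) = 1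
theorem keep_iff {n i : Int} (h2 : 2 ≤ i) (hi : i < n - 1) :
    ((¬ (2 ≤ i ∧ i < n ∧ i ∣ n)) ∧ ∀ f, 2 ≤ f → f < i → f ∣ i → ¬ (2 ≤ f ∧ f < n ∧ f ∣ n))
      ↔ Int.gcd i n = 1 := by
  constructor
  · rintro ⟨hA, hB⟩
    by_contra hg
    have hg1 : 1 ≤ Int.gcd i n := Nat.one_le_iff_ne_zero.mpr (by
      simp [Int.gcd_eq_zero_iff]; omega)
    have hg2 : 2 ≤ (Int.gcd i n : Int) := by exact_mod_cast by omega
    have hdvdi : (Int.gcd i n : Int) ∣ i := Int.gcd_dvd_left i n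
    have hdvdn : (Int.gcd i n : Int) ∣ n := Int.gcd_dvd_right i n
    have hGle : (Int.gcd i n : Int) ≤ i := Int.le_of_dvd (by omega) hdvdi
    rcases eq_or_lt_of_le hGle with hEq | hLt
    · exact hA ⟨h2, by omega, hEq ▸ hdvdn⟩
    · exact hB _ hg2 hLt hdvdi ⟨hg2, by omega, hdvdn⟩
  · intro hg
    constructor
    · rintro ⟨_, _, hdvd⟩
      have h1 : i ∣ gcd i n := dvd_gcd (dvd_refl i) hdvd
      rw [← Int.coe_gcd, hg] at h1
      have := Int.le_of_dvd (b := (1:Int)) one_pos (by exact_mod_cast h1)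
      omega
    · intro f hf2 hfi hfdvd hcon
      obtain ⟨_, _, hfn⟩ := hcon
      have h1 : f ∣ gcd i n := dvd_gcd hfdvd hfn
      rw [← Int.coe_gcd, hg] at h1
      have := Int.le_of_dvd (b := (1:Int)) one_pos (by exact_mod_cast h1)
      omega

theorem find_regular_satin_counts_spec' (n : Int) :
    find_regular_satin_counts n = find_regular_satin_counts_alt n := by
  unfold find_regular_satin_counts find_regular_satin_counts_alt
  dsimp only
  set UF := PySem.List.slice (factorize n) (some 1) (some (-1)) with hUF
  set P := PySem.List.pyRange 2 (n - 1) 1 with hP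
  set P2 := P.filter (fun i => !(UF.contains i)) with hP2
  -- the nope loop is a flatMap
  have hcong : ∀ (acc : List Int), ∀ p ∈ P2,
      (PySem.List.slice (factorize p) (some 1) (some (-1))).foldl
        (fun acc2 f => if UF.contains f then acc2 ++ [p] else acc2) acc =
      acc ++ ((PySem.List.slice (factorize p) (some 1) (some (-1))).filter
        (fun f => UF.contains f)).map (fun _ => p) :=
    fun acc p _ => PySem.List.foldl_append_if (fun f => UF.contains f) (fun _ => p) _ acc
  have hnope : P2.foldl (fun acc p =>
      (PySem.List.slice (factorize p) (some 1) (some (-1))).foldl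
        (fun acc2 f => if UF.contains f then acc2 ++ [p] else acc2) acc) [] =
      P2.flatMap (fun p =>
        ((PySem.List.slice (factorize p) (some 1) (some (-1))).filter
          (fun f => UF.contains f)).map (fun _ => p)) := by
    rw [PySem.List.foldl_congr_mem P2 _ _ [] hcong,
        PySem.List.foldl_append_eq_flatMap, List.nil_append]
  rw [hnope, hP2, List.filter_filter]
  apply List.filter_congr
  intro x hx
  rw [hP, PySem.List.mem_pyRange_one] at hx
  obtain ⟨hx2, hxlt⟩ := hx
  have hn2 : (2:Int) ≤ n := by omega
  -- both sides are decide-level booleans; move to Prop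
  rw [Bool.eq_iff_iff]
  have hgcd : pyGcd x n = (Int.gcd x n : Int) := pyGcd_eq_gcd (by omega) (by omega)
  simp only [Bool.and_eq_true, Bool.not_eq_eq_eq_not, Bool.not_true, List.contains_eq_mem,
    decide_eq_false_iff_not, List.mem_flatMap, List.mem_map, List.mem_filter, hgcd,
    beq_iff_eq, List.mem_filter]
  constructor
  · rintro ⟨hnotnope, hnotUF⟩
    have hkeep : (¬ (2 ≤ x ∧ x < n ∧ x ∣ n)) ∧
        ∀ f, 2 ≤ f → f < x → f ∣ x → ¬ (2 ≤ f ∧ f < n ∧ f ∣ n) := by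
      constructor
      · intro hc; exact hnotUF ((mem_UF hn2).mpr hc)
      · intro f hf2 hfx hfdvd hc
        exact hnotnope ⟨x, ⟨by rw [hP, PySem.List.mem_pyRange_one]; omega, hnotUF⟩,
          f, ⟨(mem_UF hx2).mpr ⟨hf2, hfx, hfdvd⟩,
            decide_eq_true ((mem_UF hn2).mpr hc)⟩, rfl⟩
    have hg := (keep_iff hx2 hxlt).mp hkeep
    exact_mod_cast congrArg (fun m : Nat => (m : Int)) hg
  · intro hg
    have hg' : Int.gcd x n = 1 := by exact_mod_cast hg
    obtain ⟨hA, hB⟩ := (keep_iff hx2 hxlt).mpr hg'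
    refine ⟨?_, fun hmem => hA ((mem_UF hn2).mp hmem)⟩
    rintro ⟨p, ⟨hpP, hpnotUF⟩, f, ⟨hfmem, hfUF⟩, hpx⟩
    subst hpx
    have h1 := (mem_UF hx2).mp hfmem
    have h2 := (mem_UF hn2).mp (of_decide_eq_true hfUF)
    exact hB f h1.1 h1.2.1 h1.2.2 h2

-- ===== VERDICT (by name: the statement is the Claim_ definition above) =====
theorem find_regular_satin_counts_spec : Claim_equal_find_regular_satin_counts := by
  intro n _
  exact find_regular_satin_counts_spec' n
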